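-- pv_equiv track=rewrite | github.com/jhandross/PQ-Excel_BI_Challenges | Excel_Challenge_779 - Linked_in_Block_Shift.py | perm_from_set
-- ===== SOURCE A (Python) =====
-- def rotate_right(lst, k):
--     n = len(lst)
--     if n == 0:
--         return lst[:]
--     k %= n
--     return lst[-k:] + lst[:-k] if k else lst[:]
--
-- def rotate_down_inplace(mat, col, k):
--     r = len(mat)
--     if r == 0:
--         return
--     k %= r
--     if k == 0:
--         return
--     col_vals = [mat[i][col] for i in range(r)]
--     new_vals = col_vals[-k:] + col_vals[:-k]
--     for i in range(r):
--         mat[i][col] = new_vals[i]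
--
-- def one_set_by_values(mat, row_shifts, col_shifts):
--     R = len(mat)
--     C = len(mat[0]) if R else 0
--     out = [row[:] for row in mat]
--
--     # Row right-rotations
--     for r in range(R):
--         k = row_shifts[r] % C if C else 0
--         out[r] = rotate_right(out[r], k)
--
--     # Column down-rotations
--     for c in range(C):
--         k = col_shifts[c] % R if R else 0
--         rotate_down_inplace(out, c, k)
--
--     return out
--
-- def perm_from_set(R, C, row_shifts, col_shifts):
--     mat_idx = [[r*C + c for c in range(C)] for r in range(R)]
--     moved = one_set_by_values(mat_idx, row_shifts, col_shifts)
--     p = [0]*(R*C)   # p[i] = new index of item that was at i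
--     for r in range(R):
--         for c in range(C):
--             old_idx = moved[r][c]
--             new_idx = r*C + c
--             p[old_idx] = new_idx
--     return p
-- ===== SOURCE B (Python) =====
-- def perm_from_set(R, C, row_shifts, col_shifts):
--     # Direct closed-form permutation: no grid simulation, no rotation helpers.
--     p = [0] * (R * C)
--     for r in range(R):
--         for c in range(C):
--             c1 = (c + row_shifts[r]) % C
--             r2 = (r + col_shifts[c1]) % R
--             p[r * C + c] = r2 * C + c1
--     return p
-- ===== Notes on version B (the rewrite author's own statement) =====
-- stated objective: simpler
-- what changed: B drops the grid simulation and the rotate_right/rotate_down helpers entirely and fills a preallocated permutation list with the closed-form target index p[r*C+c] = ((r+col_shifts[(c+row_shifts[r])%C])%R)*C + (c+row_shifts[r])%C in one double loop.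
import Mathlib
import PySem

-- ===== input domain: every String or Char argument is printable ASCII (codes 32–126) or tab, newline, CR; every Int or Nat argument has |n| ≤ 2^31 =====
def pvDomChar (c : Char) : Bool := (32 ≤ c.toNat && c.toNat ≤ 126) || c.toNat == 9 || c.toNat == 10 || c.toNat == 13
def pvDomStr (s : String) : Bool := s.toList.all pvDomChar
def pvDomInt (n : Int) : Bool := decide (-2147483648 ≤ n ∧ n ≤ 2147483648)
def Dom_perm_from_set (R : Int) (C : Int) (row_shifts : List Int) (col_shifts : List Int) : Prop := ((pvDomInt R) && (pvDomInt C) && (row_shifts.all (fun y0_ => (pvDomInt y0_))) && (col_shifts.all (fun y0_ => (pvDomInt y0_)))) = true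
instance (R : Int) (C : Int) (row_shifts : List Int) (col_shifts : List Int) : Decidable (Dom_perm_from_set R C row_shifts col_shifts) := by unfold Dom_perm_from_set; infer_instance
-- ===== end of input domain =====

-- B replaces the grid simulation with a direct closed-form fill of the permutation list (objective: simpler).


-- ===== PORT A =====
-- rotate_right(lst, k)
def rotate_right (lst : List Int) (k : Int) : List Int :=
  let n : Int := lst.length
  if n = 0 then PySem.List.slice lst none none
  else
    let k' := PySem.Int.mod k n
    if k' ≠ 0 then PySem.List.slice lst (some (-k')) none ++ PySem.List.slice lst none (some (-k'))
    else PySem.List.slice lst none none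

-- rotate_down_inplace(mat, col, k): the Python mutates mat; the port returns the updated matrix.
-- All indexings (mat[i], mat[i][col], new_vals[i]) are in range at every call site, so pyGetD/pySetD
-- with a default are exact here.
def rotate_down (mat : List (List Int)) (col : Int) (k : Int) : List (List Int) :=
  let r : Int := mat.length
  if r = 0 then mat
  else
    let k' := PySem.Int.mod k r
    if k' = 0 then mat
    else
      let col_vals := (PySem.List.pyRange 0 r 1).map (fun i => PySem.List.pyGetD (PySem.List.pyGetD mat i []) col 0)
      let new_vals := PySem.List.slice col_vals (some (-k')) none ++ PySem.List.slice col_vals none (some (-k'))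
      (PySem.List.pyRange 0 r 1).foldl
        (fun m i => PySem.List.pySetD m i (PySem.List.pySetD (PySem.List.pyGetD m i []) col (PySem.List.pyGetD new_vals i 0))) mat

-- one_set_by_values(mat, row_shifts, col_shifts); row_shifts[r]/col_shifts[c] are in range under Pre_,
-- so pyGetD with a default is exact.
def one_set_by_values (mat : List (List Int)) (row_shifts : List Int) (col_shifts : List Int) : List (List Int) :=
  let R : Int := mat.length
  let C : Int := if R ≠ 0 then ((PySem.List.pyGetD mat 0 []).length : Int) else 0
  let out0 := mat.map (fun row => PySem.List.slice row none none)
  let out1 := (PySem.List.pyRange 0 R 1).foldl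
    (fun o r =>
      let k := if C ≠ 0 then PySem.Int.mod (PySem.List.pyGetD row_shifts r 0) C else 0
      PySem.List.pySetD o r (rotate_right (PySem.List.pyGetD o r []) k)) out0
  (PySem.List.pyRange 0 C 1).foldl
    (fun o c =>
      let k := if R ≠ 0 then PySem.Int.mod (PySem.List.pyGetD col_shifts c 0) R else 0
      rotate_down o c k) out1

-- perm_from_set(R, C, row_shifts, col_shifts); p[old_idx] = new_idx always writes in range
-- (old_idx is a grid index), so pySetD is exact.
def perm_from_set (R : Int) (C : Int) (row_shifts : List Int) (col_shifts : List Int) : List Int :=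
  let mat_idx := (PySem.List.pyRange 0 R 1).map (fun r => (PySem.List.pyRange 0 C 1).map (fun c => r * C + c))
  let moved := one_set_by_values mat_idx row_shifts col_shifts
  let p0 : List Int := List.replicate (R * C).toNat 0
  (PySem.List.pyRange 0 R 1).foldl
    (fun p r =>
      (PySem.List.pyRange 0 C 1).foldl
        (fun p c =>
          PySem.List.pySetD p (PySem.List.pyGetD (PySem.List.pyGetD moved r []) c 0) (r * C + c)) p) p0

-- ===== PORT B =====
def perm_from_set_alt (R : Int) (C : Int) (row_shifts : List Int) (col_shifts : List Int) : List Int :=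
  let p0 : List Int := List.replicate (R * C).toNat 0
  (PySem.List.pyRange 0 R 1).foldl
    (fun p r =>
      (PySem.List.pyRange 0 C 1).foldl
        (fun p c =>
          let c1 := PySem.Int.mod (c + PySem.List.pyGetD row_shifts r 0) C
          let r2 := PySem.Int.mod (r + PySem.List.pyGetD col_shifts c1 0) R
          PySem.List.pySetD p (r * C + c) (r2 * C + c1)) p) p0

-- ===== PRECONDITION & SPEC =====
-- Pre_ excludes exactly the inputs where A raises IndexError: with a positive grid, row_shifts must
-- cover R rows and col_shifts C columns (B raises there too).
def Pre_perm_from_set (R : Int) (C : Int) (row_shifts : List Int) (col_shifts : List Int) : Prop :=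
  0 < R → 0 < C → (R ≤ (row_shifts.length : Int) ∧ C ≤ (col_shifts.length : Int))
instance (R : Int) (C : Int) (row_shifts : List Int) (col_shifts : List Int) : Decidable (Pre_perm_from_set R C row_shifts col_shifts) := by unfold Pre_perm_from_set; infer_instance
def pvWitness_perm_from_set : Int × Int × List Int × List Int := (2, 3, [1, 4], [0, 2, 5])
def Spec_perm_from_set (R : Int) (C : Int) (row_shifts : List Int) (col_shifts : List Int) (out : List Int) : Prop := out = perm_from_set_alt R C row_shifts col_shifts
instance (R : Int) (C : Int) (row_shifts : List Int) (col_shifts : List Int) (out : List Int) : Decidable (Spec_perm_from_set R C row_shifts col_shifts out) := by unfold Spec_perm_from_set; infer_instance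

-- ===== CLAIM (what is proved, stated in full; the proofs are below) =====
def Claim_equal_perm_from_set : Prop := ∀ (R : Int) (C : Int) (row_shifts : List Int) (col_shifts : List Int), Dom_perm_from_set R C row_shifts col_shifts → Pre_perm_from_set R C row_shifts col_shifts → Spec_perm_from_set R C row_shifts col_shifts (perm_from_set R C row_shifts col_shifts)

-- ===== LEMMAS AND PROOFS =====

def grid (Rn Cn : Nat) (F : Nat → Nat → Int) : List (List Int) :=
  (List.range Rn).map (fun a => (List.range Cn).map (F a))

theorem rot_core (n : Nat) (f : Nat → Int) (kn : Nat) (h0 : 0 < kn) (h1 : kn < n) :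
    List.drop (n - kn) ((List.range n).map f) ++ List.take (n - kn) ((List.range n).map f)
      = (List.range n).map (fun j => f ((j + (n - kn)) % n)) := by
  apply List.ext_getElem (by simp only [List.length_append, List.length_drop, List.length_take, List.length_map, List.length_range]; omega)
  intro i hi1 hi2
  simp only [List.length_append, List.length_drop, List.length_take, List.length_map,
    List.length_range] at hi1 hi2
  rw [List.getElem_append]
  simp only [List.length_drop, List.length_map, List.length_range]
  split
  · next h =>
    rw [List.getElem_drop]
    simp only [List.getElem_map, List.getElem_range]
    congr 1
    rw [Nat.mod_eq_of_lt (by omega)]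
    omega
  · next h =>
    rw [List.getElem_take]
    simp only [List.getElem_map, List.getElem_range]
    congr 1
    have heq : i + (n - kn) = (i - kn) + n := by omega
    rw [heq, Nat.add_mod_right, Nat.mod_eq_of_lt (by omega)]
    omega

theorem rot_map (n : Nat) (f : Nat → Int) (k : Int) (hn : 0 < n) :
    rotate_right ((List.range n).map f) k
      = (List.range n).map (fun j => f ((j + (n - (PySem.Int.mod k (n:Int)).toNat)) % n)) := by
  have hpos : (0:Int) < (n:Int) := by exact_mod_cast hn
  have hmlt := PySem.Int.mod_lt k hpos
  have hmnn := PySem.Int.mod_nonneg k hpos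
  have hkn : (PySem.Int.mod k (n:Int)).toNat < n := by omega
  set kn := (PySem.Int.mod k (n:Int)).toNat with hkdef
  unfold rotate_right
  simp only [List.length_map, List.length_range]
  rw [if_neg (by exact_mod_cast hn.ne')]
  by_cases hk0 : PySem.Int.mod k (n:Int) = 0
  · rw [if_neg (by simpa using hk0)]
    rw [PySem.List.slice_none_none]
    have hz : kn = 0 := by simp [hkdef, hk0]
    rw [hz]
    apply List.ext_getElem (by simp)
    intro i h1 h2
    simp only [List.getElem_map, List.getElem_range]
    congr 1
    simp only [List.length_map, List.length_range] at h1
    rw [Nat.sub_zero, Nat.add_mod_right, Nat.mod_eq_of_lt h1]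
  · rw [if_pos (by simpa using hk0)]
    have hknpos : 0 < kn := by omega
    have hcast : -(PySem.Int.mod k (n:Int)) = -((kn:Nat):Int) := by omega
    rw [hcast, PySem.List.slice_from_neg_natCast _ _ hknpos, PySem.List.slice_to_neg_natCast _ _ hknpos]
    apply List.ext_getElem (by simp only [List.length_append, List.length_drop, List.length_take, List.length_map, List.length_range]; omega)
    intro i h1 h2
    simp only [List.length_append, List.length_drop, List.length_take, List.length_map,
      List.length_range] at h1 h2
    rw [List.getElem_append]
    split
    · next h =>
      simp only [List.length_drop, List.length_map, List.length_range] at h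
      rw [List.getElem_drop]
      simp only [List.getElem_map, List.getElem_range]
      congr 1
      simp only [List.length_map, List.length_range]
      rw [Nat.mod_eq_of_lt (by omega)]
      omega
    · next h =>
      simp only [List.length_drop, List.length_map, List.length_range] at h
      rw [List.getElem_take]
      simp only [List.getElem_map, List.getElem_range, List.length_map, List.length_range,
        List.length_drop]
      congr 1
      have heq : i + (n - kn) = (i - kn) + n := by omega
      rw [heq, Nat.add_mod_right, Nat.mod_eq_of_lt (by omega)]
      omega
theorem foldl_set_range {α : Type} (d : α) (g : Nat → α → α) (n : Nat) (o : List α) :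
    ((List.range n).foldl (fun o' i => o'.set i (g i (o'.getD i d))) o).length = o.length ∧
    ∀ i : Nat, ((List.range n).foldl (fun o' i => o'.set i (g i (o'.getD i d))) o)[i]? =
      if i < n then (o[i]?).map (g i) else o[i]? := by
  induction n with
  | zero => simp
  | succ m ih =>
    rw [List.range_succ, List.foldl_append, List.foldl_cons, List.foldl_nil]
    set res := (List.range m).foldl (fun o' i => o'.set i (g i (o'.getD i d))) o with hres
    obtain ⟨ihlen, ihget⟩ := ih
    constructor
    · rw [List.length_set, ihlen]
    · intro i
      rcases lt_trichotomy i m with hlt | rfl | hgt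
      · rw [List.getElem?_set_ne (by omega), ihget, if_pos hlt, if_pos (by omega)]
      · have hres_i : res[i]? = o[i]? := by rw [ihget, if_neg (by omega)]
        by_cases hil : i < o.length
        · rw [List.getElem?_set_self (by rw [ihlen]; exact hil), if_pos (by omega)]
          rw [List.getD_eq_getElem?_getD, hres_i, List.getElem?_eq_getElem hil]
          simp
        · rw [List.set_eq_of_length_le (by omega), hres_i, if_pos (by omega)]
          rw [List.getElem?_eq_none (by omega)]
          simp
      · rw [List.getElem?_set_ne (by omega), ihget, if_neg (by omega), if_neg (by omega)]
theorem set_map_range {α : Type} (n : Nat) (f : Nat → α) (b : Nat) (v : α) :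
    ((List.range n).map f).set b v = (List.range n).map (fun j => if j = b then v else f j) := by
  apply List.ext_getElem (by simp)
  intro i h1 h2
  simp only [List.length_set, List.length_map, List.length_range] at h1
  by_cases hib : i = b
  · subst hib
    rw [List.getElem_set_self (by simpa using h1)]
    simp
  · rw [List.getElem_set_ne (by omega)]
    simp [hib]

theorem rotate_down_grid (Rn Cn : Nat) (hR : 0 < Rn) (G : Nat → Nat → Int) (b : Nat) (hb : b < Cn) (k : Int) :
    rotate_down (grid Rn Cn G) (b:Int) k
      = grid Rn Cn (fun a b' =>
          if b' = b then G ((a + (Rn - (PySem.Int.mod k (Rn:Int)).toNat)) % Rn) b else G a b') := by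
  have hlen : (grid Rn Cn G).length = Rn := by simp [grid]
  have hpos : (0:Int) < (Rn:Int) := by exact_mod_cast hR
  have hmlt := PySem.Int.mod_lt k hpos
  have hmnn := PySem.Int.mod_nonneg k hpos
  set kn := (PySem.Int.mod k (Rn:Int)).toNat with hkdef
  have hkn : kn < Rn := by omega
  unfold rotate_down
  simp only [hlen]
  rw [if_neg (by exact_mod_cast hR.ne')]
  by_cases hk0 : PySem.Int.mod k (Rn:Int) = 0
  · rw [if_pos (by simpa using hk0)]
    have hz : kn = 0 := by simp [hkdef, hk0]
    unfold grid
    apply List.map_congr_left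
    intro a ha
    apply List.map_congr_left
    intro b' hb'
    beta_reduce
    by_cases h : b' = b
    · rw [if_pos h]
      subst h
      rw [hz, Nat.sub_zero, Nat.add_mod_right, Nat.mod_eq_of_lt (by simpa using ha)]
    · rw [if_neg h]
  · rw [if_neg (by simpa using hk0)]
    have hknpos : 0 < kn := by omega
    -- col_vals = (range Rn).map (fun i => G i b)
    have hcv : (PySem.List.pyRange 0 ((grid Rn Cn G).length : Int) 1).map
        (fun i => PySem.List.pyGetD (PySem.List.pyGetD (grid Rn Cn G) i []) (b:Int) 0)
        = (List.range Rn).map (fun i => G i b) := by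
      rw [hlen, PySem.List.pyRange_zero_natCast, List.map_map]
      apply List.map_congr_left
      intro i hi
      simp only [Function.comp_apply, PySem.List.pyGetD_natCast]
      rw [grid, PySem.List.getD_map_range _ _ _ _ (by simpa using hi),
        PySem.List.getD_map_range _ _ _ _ hb]
    rw [hlen] at hcv
    rw [hcv]
    have hcast : -(PySem.Int.mod k (Rn:Int)) = -((kn:Nat):Int) := by omega
    rw [hcast, PySem.List.slice_from_neg_natCast _ _ hknpos, PySem.List.slice_to_neg_natCast _ _ hknpos]
    simp only [List.length_map, List.length_range]
    rw [rot_core Rn (fun i => G i b) kn hknpos hkn]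
    -- the write loop
    rw [PySem.List.pyRange_zero_natCast, List.foldl_map]
    have hcong : List.foldl
        (fun (m : List (List Int)) (i : Nat) => PySem.List.pySetD m (i:Int)
          (PySem.List.pySetD (PySem.List.pyGetD m (i:Int) []) (b:Int)
            (PySem.List.pyGetD ((List.range Rn).map (fun j => G ((j + (Rn - kn)) % Rn) b)) (i:Int) 0)))
        (grid Rn Cn G) (List.range Rn)
        = List.foldl
        (fun (o' : List (List Int)) (i : Nat) => o'.set i
          ((fun i row => row.set b
            (((List.range Rn).map (fun j => G ((j + (Rn - kn)) % Rn) b)).getD i 0)) i (o'.getD i [])))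
        (grid Rn Cn G) (List.range Rn) := by
      apply PySem.List.foldl_congr_mem
      intro acc x _
      simp only [PySem.List.pySetD_natCast, PySem.List.pyGetD_natCast]
    rw [hcong]
    obtain ⟨hlen2, hget⟩ := foldl_set_range ([] : List Int)
      (fun i row => row.set b (((List.range Rn).map (fun j => G ((j + (Rn - kn)) % Rn) b)).getD i 0))
      Rn (grid Rn Cn G)
    apply List.ext_getElem?
    intro i
    rw [hget i]
    by_cases hi : i < Rn
    · rw [if_pos hi]
      have hgl : (grid Rn Cn G)[i]? = some ((List.range Cn).map (G i)) := by
        rw [grid, List.getElem?_map, List.getElem?_range hi]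
        rfl
      have hgr : (grid Rn Cn (fun a b' => if b' = b then G ((a + (Rn - kn)) % Rn) b else G a b'))[i]?
          = some ((List.range Cn).map (fun b' => if b' = b then G ((i + (Rn - kn)) % Rn) b else G i b')) := by
        rw [grid, List.getElem?_map, List.getElem?_range hi]
        rfl
      rw [hgl, hgr, Option.map_some]
      congr 1
      rw [set_map_range, PySem.List.getD_map_range _ _ _ _ hi]
    · rw [if_neg hi]
      rw [List.getElem?_eq_none (by simp [grid]; omega), List.getElem?_eq_none (by simp [grid]; omega)]

theorem mod_idem (x n : Int) (h : 0 < n) :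
    PySem.Int.mod (PySem.Int.mod x n) n = PySem.Int.mod x n := by
  simp only [PySem.Int.mod_eq_emod_of_pos h]
  exact Int.emod_emod_of_dvd _ dvd_rfl

theorem row_stage (Rn Cn : Nat) (hC : 0 < Cn) (F : Nat → Nat → Int) (rs : List Int) :
    (List.range Rn).foldl
      (fun o a => o.set a (rotate_right (o.getD a []) (PySem.Int.mod (rs.getD a 0) (Cn:Int))))
      (grid Rn Cn F)
    = grid Rn Cn (fun a b =>
        F a ((b + (Cn - (PySem.Int.mod (rs.getD a 0) (Cn:Int)).toNat)) % Cn)) := by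
  obtain ⟨hlen2, hget⟩ := foldl_set_range ([] : List Int)
    (fun a row => rotate_right row (PySem.Int.mod (rs.getD a 0) (Cn:Int)))
    Rn (grid Rn Cn F)
  apply List.ext_getElem?
  intro i
  rw [hget i]
  by_cases hi : i < Rn
  · rw [if_pos hi]
    have hgl : (grid Rn Cn F)[i]? = some ((List.range Cn).map (F i)) := by
      rw [grid, List.getElem?_map, List.getElem?_range hi]; rfl
    rw [hgl, Option.map_some]
    rw [grid, List.getElem?_map, List.getElem?_range hi]
    have hpos : (0:Int) < (Cn:Int) := by exact_mod_cast hC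
    rw [rot_map Cn (F i) (PySem.Int.mod (rs.getD i 0) (Cn:Int)) hC, mod_idem _ _ hpos]
    rfl
  · rw [if_neg hi]
    rw [List.getElem?_eq_none (by simp [grid]; omega), List.getElem?_eq_none (by simp [grid]; omega)]

theorem col_stage (Rn Cn : Nat) (hR : 0 < Rn) (G : Nat → Nat → Int) (cs : List Int) :
    ∀ m, m ≤ Cn →
    (List.range m).foldl
      (fun o (c : Nat) => rotate_down o (c:Int) (PySem.Int.mod (cs.getD c 0) (Rn:Int)))
      (grid Rn Cn G)
    = grid Rn Cn (fun a b =>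
        if b < m then G ((a + (Rn - (PySem.Int.mod (cs.getD b 0) (Rn:Int)).toNat)) % Rn) b
        else G a b) := by
  intro m
  induction m with
  | zero =>
    intro _
    simp only [List.range_zero, List.foldl_nil]
    congr 1
  | succ m ih =>
    intro hm
    rw [List.range_succ, List.foldl_append, List.foldl_cons, List.foldl_nil, ih (by omega)]
    rw [rotate_down_grid Rn Cn hR _ m (by omega)]
    rw [mod_idem _ _ (by exact_mod_cast hR)]
    congr 1
    funext a b'
    by_cases hbm : b' = m
    · subst hbm
      rw [if_pos rfl, if_neg (by omega), if_pos (by omega)]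
    · rw [if_neg hbm]
      by_cases hlt : b' < m
      · rw [if_pos hlt, if_pos (by omega)]
      · rw [if_neg hlt, if_neg (by omega)]
theorem one_set_grid (Rn Cn : Nat) (hR : 0 < Rn) (hC : 0 < Cn) (F : Nat → Nat → Int) (rs cs : List Int) :
    one_set_by_values (grid Rn Cn F) rs cs
      = grid Rn Cn (fun a b =>
          F ((a + (Rn - (PySem.Int.mod (cs.getD b 0) (Rn:Int)).toNat)) % Rn)
            ((b + (Cn - (PySem.Int.mod (rs.getD ((a + (Rn - (PySem.Int.mod (cs.getD b 0) (Rn:Int)).toNat)) % Rn) 0) (Cn:Int)).toNat)) % Cn)) := by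
  unfold one_set_by_values
  simp only [grid, List.length_map, List.length_range, PySem.List.slice_none_none, List.map_id']
  have hRne : ((Rn:Int)) ≠ 0 := by exact_mod_cast hR.ne'
  have hCne : ((Cn:Int)) ≠ 0 := by exact_mod_cast hC.ne'
  have hC0 : PySem.List.pyGetD ((List.range Rn).map (fun a => (List.range Cn).map (F a))) 0 []
      = (List.range Cn).map (F 0) := by
    rw [PySem.List.pyGetD_zero, PySem.List.getD_map_range _ _ _ _ hR]
  rw [hC0]
  simp only [List.length_map, List.length_range, if_pos hRne, if_pos hCne]
  rw [PySem.List.pyRange_zero_natCast, PySem.List.pyRange_zero_natCast, List.foldl_map,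
    List.foldl_map]
  have hrow : List.foldl
      (fun (o : List (List Int)) (k : Nat) => PySem.List.pySetD o (k:Int)
        (rotate_right (PySem.List.pyGetD o (k:Int) []) (PySem.Int.mod (PySem.List.pyGetD rs (k:Int) 0) (Cn:Int))))
      (grid Rn Cn F) (List.range Rn)
      = grid Rn Cn (fun a b =>
          F a ((b + (Cn - (PySem.Int.mod (rs.getD a 0) (Cn:Int)).toNat)) % Cn)) := by
    refine Eq.trans (PySem.List.foldl_congr_mem _ _ (fun (o : List (List Int)) (k : Nat) => o.set k (rotate_right (o.getD k []) (PySem.Int.mod (rs.getD k 0) (Cn:Int)))) _ ?_) (row_stage Rn Cn hC F rs)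
    intro acc x _
    simp only [PySem.List.pySetD_natCast, PySem.List.pyGetD_natCast]
  rw [show (List.map (fun a => List.map (F a) (List.range Cn)) (List.range Rn)) = grid Rn Cn F from rfl,
    hrow]
  have hcol : List.foldl
      (fun (o : List (List Int)) (k : Nat) => rotate_down o (k:Int)
        (PySem.Int.mod (PySem.List.pyGetD cs (k:Int) 0) (Rn:Int)))
      (grid Rn Cn (fun a b => F a ((b + (Cn - (PySem.Int.mod (rs.getD a 0) (Cn:Int)).toNat)) % Cn)))
      (List.range Cn)
      = grid Rn Cn (fun a b =>
          if b < Cn then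
            (fun a b => F a ((b + (Cn - (PySem.Int.mod (rs.getD a 0) (Cn:Int)).toNat)) % Cn))
              ((a + (Rn - (PySem.Int.mod (cs.getD b 0) (Rn:Int)).toNat)) % Rn) b
          else (fun a b => F a ((b + (Cn - (PySem.Int.mod (rs.getD a 0) (Cn:Int)).toNat)) % Cn)) a b) := by
    refine Eq.trans (PySem.List.foldl_congr_mem _ _ (fun (o : List (List Int)) (k : Nat) => rotate_down o (k:Int) (PySem.Int.mod (cs.getD k 0) (Rn:Int))) _ ?_) (col_stage Rn Cn hR _ cs Cn le_rfl)
    intro acc x _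
    simp only [PySem.List.pyGetD_natCast]
  rw [hcol]
  unfold grid
  apply List.map_congr_left
  intro a ha
  apply List.map_congr_left
  intro b hb
  beta_reduce
  rw [if_pos (by simpa using hb)]
theorem cast_mod (x : Int) (b n : Nat) (hn : 0 < n) :
    PySem.Int.mod ((b:Int) + x) (n:Int)
      = (((b + (PySem.Int.mod x (n:Int)).toNat) % n : Nat) : Int) := by
  have hpos : (0:Int) < (n:Int) := by exact_mod_cast hn
  rw [PySem.Int.mod_eq_emod_of_pos hpos, PySem.Int.mod_eq_emod_of_pos hpos]
  have hnn' : 0 ≤ x % (n:Int) := Int.emod_nonneg x (by omega)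
  push_cast
  rw [Int.toNat_of_nonneg hnn', Int.add_emod_emod]

theorem scatter_aux (idx : Nat × Nat → Nat) (val : Nat × Nat → Int) (q : List Int) :
    ∀ (cells : List (Nat × Nat)),
    (∀ x ∈ cells, idx x < q.length ∧ val x = q.getD (idx x) 0) →
    ∀ (p0 : List Int), p0.length = q.length → ∀ i : Nat,
    (cells.foldl (fun p x => p.set (idx x) (val x)) p0)[i]?
      = if (∃ x ∈ cells, idx x = i) then q[i]? else p0[i]? := by
  intro cells
  induction cells with
  | nil => intro _ p0 _ i; simp
  | cons x t ih =>
    intro hval p0 hlen i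
    rw [List.foldl_cons]
    rw [ih (fun y hy => hval y (List.mem_cons_of_mem x hy)) _ (by rw [List.length_set]; exact hlen)]
    by_cases ht : ∃ y ∈ t, idx y = i
    · rw [if_pos ht, if_pos ⟨ht.choose, List.mem_cons_of_mem x ht.choose_spec.1, ht.choose_spec.2⟩]
    · rw [if_neg ht]
      obtain ⟨hxlt, hxval⟩ := hval x List.mem_cons_self
      by_cases hxi : idx x = i
      · rw [if_pos ⟨x, List.mem_cons_self, hxi⟩]
        subst hxi
        rw [List.getElem?_set_self (by omega), hxval, List.getD_eq_getElem?_getD,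
          List.getElem?_eq_getElem hxlt]
        rfl
      · rw [List.getElem?_set_ne hxi]
        rw [if_neg (by rintro ⟨y, hy, hyi⟩
                       rcases List.mem_cons.mp hy with rfl | hyt
                       · exact hxi hyi
                       · exact ht ⟨y, hyt, hyi⟩)]
def krF (rs : List Int) (Cn : Nat) (a : Nat) : Nat := (PySem.Int.mod (rs.getD a 0) (Cn:Int)).toNat
def kcF (cs : List Int) (Rn : Nat) (b : Nat) : Nat := (PySem.Int.mod (cs.getD b 0) (Rn:Int)).toNat
def c1F (rs : List Int) (Cn : Nat) (a b : Nat) : Nat := (b + krF rs Cn a) % Cn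
def MfN (rs cs : List Int) (Rn Cn : Nat) (a b : Nat) : Nat :=
  (((a + (Rn - kcF cs Rn b)) % Rn) * Cn) + ((b + (Cn - krF rs Cn ((a + (Rn - kcF cs Rn b)) % Rn))) % Cn)
def phiF (rs cs : List Int) (Rn Cn : Nat) (i : Nat) : Int :=
  (((i / Cn + kcF cs Rn (c1F rs Cn (i / Cn) (i % Cn))) % Rn : Nat) : Int) * (Cn:Int)
    + ((c1F rs Cn (i / Cn) (i % Cn) : Nat) : Int)

theorem krF_lt (rs : List Int) (Cn : Nat) (hC : 0 < Cn) (a : Nat) : krF rs Cn a < Cn := by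
  have h1 := PySem.Int.mod_lt (rs.getD a 0) (b := (Cn:Int)) (by exact_mod_cast hC)
  have h2 := PySem.Int.mod_nonneg (rs.getD a 0) (b := (Cn:Int)) (by exact_mod_cast hC)
  unfold krF; omega

theorem kcF_lt (cs : List Int) (Rn : Nat) (hR : 0 < Rn) (b : Nat) : kcF cs Rn b < Rn := by
  have h1 := PySem.Int.mod_lt (cs.getD b 0) (b := (Rn:Int)) (by exact_mod_cast hR)
  have h2 := PySem.Int.mod_nonneg (cs.getD b 0) (b := (Rn:Int)) (by exact_mod_cast hR)
  unfold kcF; omega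

theorem MfN_lt (rs cs : List Int) (Rn Cn : Nat) (hR : 0 < Rn) (hC : 0 < Cn) (a b : Nat) :
    MfN rs cs Rn Cn a b < Rn * Cn := by
  unfold MfN
  have h1 : (a + (Rn - kcF cs Rn b)) % Rn < Rn := Nat.mod_lt _ hR
  have h2 : (b + (Cn - krF rs Cn ((a + (Rn - kcF cs Rn b)) % Rn))) % Cn < Cn := Nat.mod_lt _ hC
  calc ((a + (Rn - kcF cs Rn b)) % Rn) * Cn + ((b + (Cn - krF rs Cn ((a + (Rn - kcF cs Rn b)) % Rn))) % Cn)
      < ((a + (Rn - kcF cs Rn b)) % Rn) * Cn + Cn := by omega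
    _ = (((a + (Rn - kcF cs Rn b)) % Rn) + 1) * Cn := by ring
    _ ≤ Rn * Cn := Nat.mul_le_mul_right _ (by omega)


theorem div_decomp (x y n : Nat) (hn : 0 < n) (hy : y < n) : (x * n + y) / n = x := by
  rw [Nat.add_comm, Nat.add_mul_div_right _ _ hn, Nat.div_eq_of_lt hy, Nat.zero_add]

theorem mod_decomp (x y n : Nat) (hy : y < n) : (x * n + y) % n = y := by
  rw [Nat.add_comm, Nat.add_mul_mod_self_right, Nat.mod_eq_of_lt hy]

theorem phiF_MfN (rs cs : List Int) (Rn Cn : Nat) (hR : 0 < Rn) (hC : 0 < Cn)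
    (a b : Nat) (ha : a < Rn) (hb : b < Cn) :
    phiF rs cs Rn Cn (MfN rs cs Rn Cn a b) = (a : Int) * (Cn : Int) + (b : Int) := by
  have hkc := kcF_lt cs Rn hR b
  set a' := (a + (Rn - kcF cs Rn b)) % Rn with ha'
  have hkr := krF_lt rs Cn hC a'
  have hb'' : (b + (Cn - krF rs Cn a')) % Cn < Cn := Nat.mod_lt _ hC
  have hdiv : MfN rs cs Rn Cn a b / Cn = a' := by
    unfold MfN; rw [← ha', div_decomp _ _ _ hC hb'']
  have hmod : MfN rs cs Rn Cn a b % Cn = (b + (Cn - krF rs Cn a')) % Cn := by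
    unfold MfN; rw [← ha', mod_decomp _ _ _ hb'']
  unfold phiF
  rw [hdiv, hmod]
  have hc1 : c1F rs Cn a' ((b + (Cn - krF rs Cn a')) % Cn) = b := by
    unfold c1F
    rw [Nat.mod_add_mod]
    have : b + (Cn - krF rs Cn a') + krF rs Cn a' = b + Cn := by omega
    rw [this, Nat.add_mod_right, Nat.mod_eq_of_lt hb]
  rw [hc1]
  have hr2 : (a' + kcF cs Rn b) % Rn = a := by
    rw [ha', Nat.mod_add_mod]
    have : a + (Rn - kcF cs Rn b) + kcF cs Rn b = a + Rn := by omega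
    rw [this, Nat.add_mod_right, Nat.mod_eq_of_lt ha]
  rw [hr2]

theorem MfN_cover (rs cs : List Int) (Rn Cn : Nat) (hR : 0 < Rn) (hC : 0 < Cn)
    (i : Nat) (hi : i < Rn * Cn) :
    c1F rs Cn (i / Cn) (i % Cn) < Cn ∧
    (i / Cn + kcF cs Rn (c1F rs Cn (i / Cn) (i % Cn))) % Rn < Rn ∧
    MfN rs cs Rn Cn ((i / Cn + kcF cs Rn (c1F rs Cn (i / Cn) (i % Cn))) % Rn)
      (c1F rs Cn (i / Cn) (i % Cn)) = i := by
  have ha0 : i / Cn < Rn := Nat.div_lt_of_lt_mul (by rw [Nat.mul_comm]; exact hi)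
  have hb0 : i % Cn < Cn := Nat.mod_lt _ hC
  set a0 := i / Cn
  set b0 := i % Cn
  set c1 := c1F rs Cn a0 b0 with hc1def
  set r2 := (a0 + kcF cs Rn c1) % Rn with hr2def
  have hc1lt : c1 < Cn := Nat.mod_lt _ hC
  have hr2lt : r2 < Rn := Nat.mod_lt _ hR
  refine ⟨hc1lt, hr2lt, ?_⟩
  have hkc := kcF_lt cs Rn hR c1
  have ha' : (r2 + (Rn - kcF cs Rn c1)) % Rn = a0 := by
    rw [hr2def, Nat.mod_add_mod]
    have : a0 + kcF cs Rn c1 + (Rn - kcF cs Rn c1) = a0 + Rn := by omega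
    rw [this, Nat.add_mod_right, Nat.mod_eq_of_lt ha0]
  have hkr := krF_lt rs Cn hC a0
  have hb'' : (c1 + (Cn - krF rs Cn a0)) % Cn = b0 := by
    rw [hc1def]
    unfold c1F
    rw [Nat.mod_add_mod]
    have : b0 + krF rs Cn a0 + (Cn - krF rs Cn a0) = b0 + Cn := by omega
    rw [this, Nat.add_mod_right, Nat.mod_eq_of_lt hb0]
  unfold MfN
  rw [ha', hb'']
  exact Nat.div_add_mod' i Cn
def cellsL (Rn Cn : Nat) : List (Nat × Nat) :=
  (List.range Rn).flatMap (fun a => (List.range Cn).map (fun b => (a, b)))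

theorem mem_cellsL (Rn Cn : Nat) (x : Nat × Nat) :
    x ∈ cellsL Rn Cn ↔ x.1 < Rn ∧ x.2 < Cn := by
  cases x with
  | mk a b => simp [cellsL]

theorem nested_to_cells {α : Type} (f : α → Nat → Nat → α) (init : α) (Rn Cn : Nat) :
    (List.range Rn).foldl (fun p a => (List.range Cn).foldl (fun p b => f p a b) p) init
      = (cellsL Rn Cn).foldl (fun p x => f p x.1 x.2) init := by
  rw [cellsL, List.foldl_flatMap]
  apply PySem.List.foldl_congr_mem
  intro acc a _
  rw [List.foldl_map]

theorem scatter_eq (idx : Nat × Nat → Nat) (val : Nat × Nat → Int) (q : List Int)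
    (cells : List (Nat × Nat))
    (hval : ∀ x ∈ cells, idx x < q.length ∧ val x = q.getD (idx x) 0)
    (hcov : ∀ i, i < q.length → ∃ x ∈ cells, idx x = i)
    (p0 : List Int) (hlen : p0.length = q.length) :
    cells.foldl (fun p x => p.set (idx x) (val x)) p0 = q := by
  apply List.ext_getElem?
  intro i
  rw [scatter_aux idx val q cells hval p0 hlen i]
  by_cases hi : i < q.length
  · rw [if_pos (hcov i hi)]
  · split
    · rfl
    · rw [List.getElem?_eq_none (by omega), List.getElem?_eq_none (by omega)]
theorem main_pos (Rn Cn : Nat) (hR : 0 < Rn) (hC : 0 < Cn) (rs cs : List Int) :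
    perm_from_set (Rn:Int) (Cn:Int) rs cs = perm_from_set_alt (Rn:Int) (Cn:Int) rs cs := by
  unfold perm_from_set perm_from_set_alt
  dsimp only
  have hmat : List.map (fun r => List.map (fun c => r * (Cn:Int) + c) (PySem.List.pyRange 0 (Cn:Int)))
      (PySem.List.pyRange 0 (Rn:Int)) = grid Rn Cn (fun a b => (a:Int) * (Cn:Int) + (b:Int)) := by
    rw [PySem.List.pyRange_zero_natCast, PySem.List.pyRange_zero_natCast, List.map_map]
    unfold grid
    apply List.map_congr_left
    intro a _
    simp only [Function.comp_apply, List.map_map]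
    rfl
  rw [hmat, one_set_grid Rn Cn hR hC _ rs cs]
  have hmov : grid Rn Cn (fun a b =>
        ((((a + (Rn - (PySem.Int.mod (cs.getD b 0) (Rn:Int)).toNat)) % Rn : Nat) : Int) * (Cn:Int)
          + (((b + (Cn - (PySem.Int.mod (rs.getD ((a + (Rn - (PySem.Int.mod (cs.getD b 0) (Rn:Int)).toNat)) % Rn) 0) (Cn:Int)).toNat)) % Cn : Nat) : Int)))
      = grid Rn Cn (fun a b => ((MfN rs cs Rn Cn a b : Nat) : Int)) := by
    congr 1
  rw [hmov]
  set q : List Int := (List.range (Rn * Cn)).map (phiF rs cs Rn Cn) with hq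
  have hql : q.length = Rn * Cn := by simp [hq]
  have hp0l : (List.replicate ((Rn:Int) * (Cn:Int)).toNat (0:Int)).length = q.length := by
    rw [hql, List.length_replicate, ← Nat.cast_mul, Int.toNat_natCast]
  rw [PySem.List.pyRange_zero_natCast, PySem.List.pyRange_zero_natCast]
  simp only [List.foldl_map]
  rw [nested_to_cells (fun p a b => PySem.List.pySetD p
      (PySem.List.pyGetD (PySem.List.pyGetD (grid Rn Cn (fun a b => ((MfN rs cs Rn Cn a b : Nat) : Int))) (a:Int) []) (b:Int) 0)
      ((a:Int) * (Cn:Int) + (b:Int)))]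
  rw [nested_to_cells (fun p a b =>
      PySem.List.pySetD p ((a:Int) * (Cn:Int) + (b:Int))
        (PySem.Int.mod ((a:Int) + PySem.List.pyGetD cs (PySem.Int.mod ((b:Int) + PySem.List.pyGetD rs (a:Int) 0) (Cn:Int)) 0) (Rn:Int) * (Cn:Int)
          + PySem.Int.mod ((b:Int) + PySem.List.pyGetD rs (a:Int) 0) (Cn:Int)))]
  -- A side: rewrite body into set form and apply scatter_eq
  have hA : (cellsL Rn Cn).foldl (fun p x => PySem.List.pySetD p
      (PySem.List.pyGetD (PySem.List.pyGetD (grid Rn Cn (fun a b => ((MfN rs cs Rn Cn a b : Nat) : Int))) (x.1:Int) []) (x.2:Int) 0)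
      ((x.1:Int) * (Cn:Int) + (x.2:Int))) (List.replicate ((Rn:Int) * (Cn:Int)).toNat (0:Int))
      = q := by
    refine Eq.trans (PySem.List.foldl_congr_mem _ _
      (fun p x => p.set (MfN rs cs Rn Cn x.1 x.2) ((x.1:Int) * (Cn:Int) + (x.2:Int))) _ ?_) ?_
    · intro acc x hx
      obtain ⟨hx1, hx2⟩ := (mem_cellsL Rn Cn x).mp hx
      simp only [PySem.List.pyGetD_natCast, grid]
      rw [PySem.List.getD_map_range _ _ _ _ hx1, PySem.List.getD_map_range _ _ _ _ hx2,
        PySem.List.pySetD_natCast]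
    · apply scatter_eq _ _ _ _ ?_ ?_ _ hp0l
      · intro x hx
        obtain ⟨hx1, hx2⟩ := (mem_cellsL Rn Cn x).mp hx
        refine ⟨by rw [hql]; exact MfN_lt rs cs Rn Cn hR hC x.1 x.2, ?_⟩
        rw [hq, PySem.List.getD_map_range _ _ _ _ (MfN_lt rs cs Rn Cn hR hC x.1 x.2)]
        exact (phiF_MfN rs cs Rn Cn hR hC x.1 x.2 hx1 hx2).symm
      · intro i hi
        rw [hql] at hi
        obtain ⟨h1, h2, h3⟩ := MfN_cover rs cs Rn Cn hR hC i hi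
        exact ⟨((i / Cn + kcF cs Rn (c1F rs Cn (i / Cn) (i % Cn))) % Rn,
                c1F rs Cn (i / Cn) (i % Cn)),
               (mem_cellsL Rn Cn _).mpr ⟨h2, h1⟩, h3⟩
  -- B side
  have hB : (cellsL Rn Cn).foldl (fun p x =>
      PySem.List.pySetD p ((x.1:Int) * (Cn:Int) + (x.2:Int))
        (PySem.Int.mod ((x.1:Int) + PySem.List.pyGetD cs (PySem.Int.mod ((x.2:Int) + PySem.List.pyGetD rs (x.1:Int) 0) (Cn:Int)) 0) (Rn:Int) * (Cn:Int)
          + PySem.Int.mod ((x.2:Int) + PySem.List.pyGetD rs (x.1:Int) 0) (Cn:Int)))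
      (List.replicate ((Rn:Int) * (Cn:Int)).toNat (0:Int))
      = q := by
    refine Eq.trans (PySem.List.foldl_congr_mem _ _
      (fun p x => p.set (x.1 * Cn + x.2) (phiF rs cs Rn Cn (x.1 * Cn + x.2))) _ ?_) ?_
    · intro acc x hx
      obtain ⟨hx1, hx2⟩ := (mem_cellsL Rn Cn x).mp hx
      have hc1 : PySem.Int.mod ((x.2:Int) + PySem.List.pyGetD rs (x.1:Int) 0) (Cn:Int)
          = ((c1F rs Cn x.1 x.2 : Nat) : Int) := by
        rw [PySem.List.pyGetD_natCast]
        exact cast_mod (rs.getD x.1 0) x.2 Cn hC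
      rw [hc1, PySem.List.pyGetD_natCast]
      have hr2 : PySem.Int.mod ((x.1:Int) + cs.getD (c1F rs Cn x.1 x.2) 0) (Rn:Int)
          = (((x.1 + kcF cs Rn (c1F rs Cn x.1 x.2)) % Rn : Nat) : Int) := by
        exact cast_mod (cs.getD (c1F rs Cn x.1 x.2) 0) x.1 Rn hR
      rw [hr2]
      have hidx : (x.1:Int) * (Cn:Int) + (x.2:Int) = ((x.1 * Cn + x.2 : Nat) : Int) := by push_cast; ring
      rw [hidx, PySem.List.pySetD_natCast]
      congr 1
      unfold phiF
      rw [div_decomp _ _ _ hC hx2, mod_decomp _ _ _ hx2]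
    · apply scatter_eq _ _ _ _ ?_ ?_ _ hp0l
      · intro x hx
        obtain ⟨hx1, hx2⟩ := (mem_cellsL Rn Cn x).mp hx
        have hlt : x.1 * Cn + x.2 < Rn * Cn := by
          calc x.1 * Cn + x.2 < x.1 * Cn + Cn := by omega
            _ = (x.1 + 1) * Cn := by ring
            _ ≤ Rn * Cn := Nat.mul_le_mul_right _ (by omega)
        refine ⟨by rw [hql]; exact hlt, ?_⟩
        rw [hq, PySem.List.getD_map_range _ _ _ _ hlt]
      · intro i hi
        rw [hql] at hi
        have ha0 : i / Cn < Rn := Nat.div_lt_of_lt_mul (by rw [Nat.mul_comm]; exact hi)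
        have hb0 : i % Cn < Cn := Nat.mod_lt _ hC
        exact ⟨(i / Cn, i % Cn), (mem_cellsL Rn Cn _).mpr ⟨ha0, hb0⟩, Nat.div_add_mod' i Cn⟩
  rw [hA, hB]
theorem main_degen (R C : Int) (rs cs : List Int) (h : R ≤ 0 ∨ C ≤ 0) :
    perm_from_set R C rs cs = perm_from_set_alt R C rs cs := by
  unfold perm_from_set perm_from_set_alt
  dsimp only
  rcases h with h | h
  · rw [PySem.List.pyRange_one_eq_nil h]
    simp
  · rw [PySem.List.pyRange_one_eq_nil h]
    simp [List.foldl_fixed]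

-- ===== VERDICT (by name: the statement is the Claim_ definition above) =====
theorem perm_from_set_spec : Claim_equal_perm_from_set := by
  intro R C rs cs _ _
  unfold Spec_perm_from_set
  by_cases hR : 0 < R
  · by_cases hC : 0 < C
    · lift R to ℕ using le_of_lt hR
      lift C to ℕ using le_of_lt hC
      exact main_pos _ _ (by exact_mod_cast hR) (by exact_mod_cast hC) rs cs
    · exact main_degen R C rs cs (Or.inr (by omega))
  · exact main_degen R C rs cs (Or.inl (by omega))
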